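-- pv_equiv track=rewrite | github.com/aqemery/advent-of-code | 2015/05.py | part2
-- ===== SOURCE A (Python) =====
-- def part2(data):
--     nice = 0
--     for s in data:
--         alternate = False
--         for i, c in enumerate(s[:-2]):
--             if c == s[i + 2]:
--                 alternate = True
--                 break
--
--         last = None
--         pair = False
--         for i, c in enumerate(s):
--             if f"{last}{c}" in s[i + 1 :]:
--                 pair = True
--                 break
--             last = c
--
--         if alternate and pair:
--             nice += 1
--     return nice
-- ===== SOURCE B (Python) =====
-- def part2(data):
--     nice = 0
--     for s in data:
--         repeat = any(a == c for a, c in zip(s, s[2:]))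
--         first = {}
--         twice = False
--         for i in range(len(s) - 1):
--             p = s[i:i + 2]
--             if p in first:
--                 if i - first[p] >= 2:
--                     twice = True
--                     break
--             else:
--                 first[p] = i
--         if repeat and twice:
--             nice += 1
--     return nice
-- ===== Notes on version B (the rewrite author's own statement) =====
-- stated objective: alternative
-- what changed: B replaces A's per-position substring searches ('pair in s[i+1:]' rebuilds a slice and rescans the tail for every position, with an f-string that renders the initial last=None as the text 'None') by a single pass per string that records the first index of each adjacent pair in a dict and reports a repeat as soon as the same pair recurs at distance >= 2; the xyx rule becomes a zip scan.
-- intended difference: On strings whose tail contains the literal text 'None' followed by the string's first character (while satisfying the xyx rule and having no genuinely repeated pair), A's f-string renders the initial last=None as the text 'None', so A wrongly counts the string as nice; B counts only strings with a real non-overlapping repeated pair, which is the intended AoC rule. — e.g. on part2(["aNoneaxyx"]): A returns 1, B returns 0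
import Mathlib
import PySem

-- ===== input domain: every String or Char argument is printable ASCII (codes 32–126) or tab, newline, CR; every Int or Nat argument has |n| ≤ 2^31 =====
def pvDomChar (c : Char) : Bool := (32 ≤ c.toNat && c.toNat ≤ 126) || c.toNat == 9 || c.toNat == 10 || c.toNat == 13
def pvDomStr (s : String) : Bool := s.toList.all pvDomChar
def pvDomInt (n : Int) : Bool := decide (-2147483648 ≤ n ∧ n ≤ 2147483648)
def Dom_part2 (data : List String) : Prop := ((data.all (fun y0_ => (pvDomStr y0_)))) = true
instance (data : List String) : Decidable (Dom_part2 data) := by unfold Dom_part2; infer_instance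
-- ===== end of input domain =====

-- B counts nice strings in one pass per string (dict of first index of each adjacent
-- pair, zip scan for the xyx rule) instead of A's per-position substring searches;
-- B also drops A's f-string artefact that treats the text "None" as a pair (see D_).

-- ===== PORT A =====
-- f"{last}{c}" : for last = None Python renders the text "None"
def pvPairStr (last : Option Char) (c : Char) : List Char :=
  match last with
  | none => "None".toList ++ [c]
  | some l => [l, c]

-- for i, c in enumerate(s[:-2]): if c == s[i+2]: alternate = True; break
def pvAltLoop (s : List Char) : List (Int × Char) → Bool
  | [] => false
  | (i, c) :: rest =>
    if c == PySem.List.pyGetD s (i + 2) ' ' then true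
    else pvAltLoop s rest

-- for i, c in enumerate(s): if f"{last}{c}" in s[i+1:]: pair = True; break; last = c
def pvPairLoop (s : List Char) : List (Int × Char) → Option Char → Bool
  | [], _ => false
  | (i, c) :: rest, last =>
    if PySem.Chars.isIn (pvPairStr last c) (PySem.List.slice s (some (i + 1)) none) then true
    else pvPairLoop s rest (some c)

def part2 (data : List String) : Int :=
  data.foldl (fun nice s =>
    let l := s.toList
    let alternate := pvAltLoop l (PySem.List.enumerate (PySem.List.slice l none (some (-2))) 0)
    let pair := pvPairLoop l (PySem.List.enumerate l 0) none
    if alternate && pair then nice + 1 else nice) 0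

-- ===== PORT B =====
-- repeat = any(a == c for a, c in zip(s, s[2:]))
def pvRepeatZip (l : List Char) : Bool :=
  (l.zip (l.drop 2)).any (fun p => p.1 == p.2)

-- for i in range(len(s)-1): p = s[i:i+2]; first-occurrence dict, break when gap >= 2
def pvTwiceLoop (s : List Char) : List Int → PySem.Dict (List Char) Int → Bool
  | [], _ => false
  | i :: rest, first =>
    let p := PySem.List.slice s (some i) (some (i + 2))
    match PySem.Dict.get? first p with
    | some j => if 2 ≤ i - j then true else pvTwiceLoop s rest first
    | none => pvTwiceLoop s rest (PySem.Dict.insert first p i)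

def part2_alt (data : List String) : Int :=
  data.foldl (fun nice s =>
    let l := s.toList
    let rep := pvRepeatZip l
    let twice := pvTwiceLoop l (PySem.List.pyRange 0 (PySem.List.len l - 1) 1) PySem.Dict.empty
    if rep && twice then nice + 1 else nice) 0

-- ===== PRECONDITION & SPEC =====
-- On strings whose tail contains the text "None" followed by the first character (and
-- which satisfy the xyx rule but have no real non-overlapping repeated pair), A's
-- f-string renders last=None as "None" and wrongly counts the string; B counts only
-- strings with a genuine repeated pair, the intended AoC rule.
def D_part2 (data : List String) : Prop :=
  ∃ s ∈ data,
    let l := s.toList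
    (∃ i < l.length - 2, l[i]! = l[i + 2]!) ∧
    "None".toList ++ l.take 1 <:+: l.tail ∧
    ∀ k < l.length - 1, ¬ (l.drop k).take 2 <:+: l.drop (k + 2)
instance (data : List String) : Decidable (D_part2 data) := by unfold D_part2; infer_instance

def Spec_part2 (data : List String) (out : Int) : Prop := ¬ D_part2 data → out = part2_alt data
instance (data : List String) (out : Int) : Decidable (Spec_part2 data out) := by unfold Spec_part2; infer_instance

def pvDiffWitness_part2 : List String := ["aNoneaxyx"]
def pvDiffWitnessOut_part2 : Int × Int := (1, 0)

-- ===== CLAIM (what is proved, stated in full; the proofs are below) =====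
def Claim_unchanged_part2 : Prop := ∀ (data : List String), Dom_part2 data → Spec_part2 data (part2 data)
def Claim_changed_part2 : Prop := Dom_part2 (pvDiffWitness_part2) ∧ D_part2 (pvDiffWitness_part2) ∧ part2 (pvDiffWitness_part2) = pvDiffWitnessOut_part2.1 ∧ part2_alt (pvDiffWitness_part2) = pvDiffWitnessOut_part2.2 ∧ pvDiffWitnessOut_part2.1 ≠ pvDiffWitnessOut_part2.2
def Claim_exact_part2 : Prop := ∀ (data : List String), Dom_part2 data → D_part2 data → part2 data ≠ part2_alt data

-- ===== LEMMAS AND PROOFS =====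

def hasRepeatB : List Char → Bool
  | a :: b :: c :: t => a == c || hasRepeatB (b :: c :: t)
  | _ => false

def hasPairB : List Char → Bool
  | a :: b :: t => decide ([a, b] <:+: t) || hasPairB (b :: t)
  | _ => false

def quirkB : List Char → Bool
  | [] => false
  | c :: t => decide (('N' :: 'o' :: 'n' :: 'e' :: [c]) <:+: t)

def pvDFlag (l : List Char) : Bool := hasRepeatB l && quirkB l && !hasPairB l

def pvANice (l : List Char) : Bool := hasRepeatB l && (quirkB l || hasPairB l)
def pvBNice (l : List Char) : Bool := hasRepeatB l && hasPairB l

theorem isIn_eq_decide (sub l : List Char) :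
    PySem.Chars.isIn sub l = decide (sub <:+: l) := by
  by_cases h : sub <:+: l
  · rw [decide_eq_true h, PySem.Chars.isIn_iff_infix]
    exact h
  · rw [decide_eq_false h, PySem.Chars.isIn_eq_false_iff]
    exact h

theorem hasRepeatB_short (l : List Char) (h : l.length ≤ 2) : hasRepeatB l = false := by
  match l with
  | [] => rfl
  | [_] => rfl
  | [_, _] => rfl
  | _ :: _ :: _ :: _ => simp at h

theorem altLoop_drop (s : List Char) (k : Nat) :
    pvAltLoop s (PySem.List.enumerate ((s.take (s.length - 2)).drop k) (k : Int)) =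
      hasRepeatB (s.drop k) := by
  induction h : s.length - 2 - k generalizing k with
  | zero =>
    have h1 : (s.take (s.length - 2)).drop k = [] :=
      List.drop_eq_nil_of_le (by simp; omega)
    rw [h1, PySem.List.enumerate_nil]
    simp only [pvAltLoop]
    exact (hasRepeatB_short _ (by rw [List.length_drop]; omega)).symm
  | succ n ih =>
    have hk2 : k + 2 < s.length := by omega
    have htake : (s.take (s.length - 2)).drop k = s[k] :: (s.take (s.length - 2)).drop (k + 1) := by
      rw [List.drop_eq_getElem_cons (by simp; omega)]
      congr 1
      exact List.getElem_take
    rw [htake, PySem.List.enumerate_cons]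
    simp only [pvAltLoop]
    have hget : PySem.List.pyGetD s ((k : Int) + 2) ' ' = s[k + 2] := by
      have hc : ((k : Int) + 2) = ((k + 2 : Nat) : Int) := by push_cast; ring
      rw [hc, PySem.List.pyGetD_natCast, List.getD_eq_getElem?_getD, List.getElem?_eq_getElem hk2]
      rfl
    have hd1 : s.drop k = s[k] :: s.drop (k + 1) := List.drop_eq_getElem_cons (by omega)
    have hd2 : s.drop (k + 1) = s[k + 1] :: s.drop (k + 2) := List.drop_eq_getElem_cons (by omega)
    have hd3 : s.drop (k + 2) = s[k + 2] :: s.drop (k + 3) := List.drop_eq_getElem_cons (by omega)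
    rw [hd1, hd2, hd3]
    simp only [hasRepeatB]
    rw [← hd3, ← hd2]
    have hcast : (k : Int) + 1 = ((k + 1 : Nat) : Int) := by push_cast; ring
    rw [hget, hcast, ih (k + 1) (by omega)]
    cases heq : s[k] == s[k + 2] <;> simp

theorem repeatZip_eq (l : List Char) : pvRepeatZip l = hasRepeatB l := by
  induction l using hasRepeatB.induct with
  | case1 a b c t ih =>
    simp only [pvRepeatZip] at ih ⊢
    simp only [List.drop_succ_cons, List.drop_zero] at ih ⊢
    rw [List.zip_cons_cons, List.any_cons, ih]
    simp only [hasRepeatB]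
  | case2 l h =>
    have hlen : l.length ≤ 2 := by
      match l with
      | [] => simp
      | [_] => simp
      | [_, _] => simp
      | a :: b :: c :: t => exact absurd rfl (by intro hh; exact (h a b c t hh).elim)
    rw [hasRepeatB_short l hlen]
    match l with
    | [] => rfl
    | [_] => rfl
    | [_, _] => rfl
    | a :: b :: c :: t => exact absurd rfl (by intro hh; exact (h a b c t hh).elim)

theorem pairLoop_drop (s : List Char) (k : Nat) (hk : k < s.length) :
    pvPairLoop s (PySem.List.enumerate (s.drop (k + 1)) ((k : Int) + 1)) (some s[k]) =
      hasPairB (s.drop k) := by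
  induction h : s.length - (k + 1) generalizing k with
  | zero =>
    have h1 : s.drop (k + 1) = [] := List.drop_eq_nil_of_le (by omega)
    have h0 : s.drop k = [s[k]] := by
      rw [List.drop_eq_getElem_cons hk, h1]
    rw [h1, PySem.List.enumerate_nil, h0]
    simp only [pvPairLoop, hasPairB]
  | succ n ih =>
    have hk1 : k + 1 < s.length := by omega
    have hd1 : s.drop (k + 1) = s[k + 1] :: s.drop (k + 2) := List.drop_eq_getElem_cons hk1
    rw [hd1, PySem.List.enumerate_cons]
    simp only [pvPairLoop, pvPairStr]
    have hc : (k : Int) + 1 + 1 = ((k + 2 : Nat) : Int) := by push_cast; ring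
    rw [hc, PySem.List.slice_from_natCast]
    rw [show ((k + 2 : Nat) : Int) = ((k + 1 : Nat) : Int) + 1 by push_cast; ring]
    rw [ih (k + 1) hk1 (by omega)]
    have hd0 : s.drop k = s[k] :: s.drop (k + 1) := List.drop_eq_getElem_cons hk
    rw [hd0, hd1]
    simp only [hasPairB]
    rw [← hd1]
    simp only [isIn_eq_decide]
    split <;> simp_all

theorem pairLoop_top (l : List Char) :
    pvPairLoop l (PySem.List.enumerate l 0) none = (quirkB l || hasPairB l) := by
  cases l with
  | nil => rfl
  | cons c t =>
    rw [PySem.List.enumerate_cons]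
    simp only [pvPairLoop, pvPairStr]
    have h1 := pairLoop_drop (c :: t) 0 (by simp)
    simp only [Nat.cast_zero, zero_add, List.drop_succ_cons, List.drop_zero,
      List.getElem_cons_zero] at h1
    rw [zero_add, PySem.List.slice_from_one, List.tail_cons, h1]
    simp only [isIn_eq_decide, show "None".toList ++ [c] = 'N' :: 'o' :: 'n' :: 'e' :: [c] from rfl]
    simp only [quirkB]
    split <;> simp_all

theorem hasPairB_iff (l : List Char) :
    hasPairB l = true ↔ ∃ j k : Nat, j + 2 ≤ k ∧ k + 2 ≤ l.length ∧
      (l.drop j).take 2 = (l.drop k).take 2 := by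
  induction l using hasPairB.induct with
  | case1 a b t ih =>
    simp only [hasPairB, Bool.or_eq_true, decide_eq_true_eq, ih]
    constructor
    · rintro (hin | ⟨j, k, h1, h2, h3⟩)
      · obtain ⟨m, hpre⟩ := (PySem.Chars.exists_prefix_drop_iff_isIn [a, b] t).mpr
          ((PySem.Chars.isIn_iff_infix [a, b] t).mpr hin)
        have hlen : 2 ≤ (t.drop m).length := by
          have := hpre.length_le
          simpa using this
        have heq : [a, b] = (t.drop m).take 2 := by
          have := List.prefix_iff_eq_take.mp hpre
          simpa using this
        refine ⟨0, m + 2, by omega, by simp [List.length_drop] at hlen ⊢; omega, ?_⟩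
        simpa using heq
      · exact ⟨j + 1, k + 1, by omega, by simp at h2 ⊢; omega, by simpa using h3⟩
    · rintro ⟨j, k, h1, h2, h3⟩
      cases j with
      | zero =>
        left
        obtain ⟨k', rfl⟩ : ∃ k', k = k' + 2 := ⟨k - 2, by omega⟩
        have heq : [a, b] = (t.drop k').take 2 := by simpa using h3
        refine (PySem.Chars.isIn_iff_infix [a, b] t).mp
          ((PySem.Chars.exists_prefix_drop_iff_isIn [a, b] t).mp ⟨k', ?_⟩)
        rw [List.prefix_iff_eq_take]
        simpa using heq
      | succ j' =>
        right
        obtain ⟨k'', rfl⟩ : ∃ k'', k = k'' + 1 := ⟨k - 1, by omega⟩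
        exact ⟨j', k'', by omega, by simp at h2 ⊢; omega, by simpa using h3⟩
  | case2 l h =>
    have hlen : l.length ≤ 1 := by
      match l with
      | [] => simp
      | [_] => simp
      | a :: b :: t => exact absurd rfl (by intro hh; exact (h a b t hh).elim)
    constructor
    · intro hp
      exfalso
      match l with
      | [] => simp [hasPairB] at hp
      | [_] => simp [hasPairB] at hp
      | a :: b :: t => exact absurd rfl (by intro hh; exact (h a b t hh).elim)
    · rintro ⟨j, k, h1, h2, h3⟩
      omega

theorem twice_inv (s : List Char) (fuel : Nat) :
    ∀ (i : Nat) (d : PySem.Dict (List Char) Int),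
    s.length - 1 - i ≤ fuel →
    (∀ p v, d.get? p = some v → ∃ j : Nat, v = (j : Int) ∧ j < i ∧ j + 2 ≤ s.length ∧
        (s.drop j).take 2 = p ∧ ∀ j' < j, (s.drop j').take 2 ≠ p) →
    (∀ j : Nat, j < i → j + 2 ≤ s.length → d.contains ((s.drop j).take 2) = true) →
    (¬ ∃ j k : Nat, j + 2 ≤ k ∧ k < i ∧ k + 2 ≤ s.length ∧
        (s.drop j).take 2 = (s.drop k).take 2) →
    pvTwiceLoop s (PySem.List.pyRange (i : Int) ((s.length : Int) - 1) 1) d = hasPairB s := by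
  induction fuel with
  | zero =>
    intro i d hf _ _ hno
    have hbig : (s.length : Int) - 1 ≤ (i : Int) := by omega
    rw [PySem.List.pyRange_one_eq_nil hbig]
    simp only [pvTwiceLoop]
    cases hp : hasPairB s with
    | false => rfl
    | true =>
      obtain ⟨j, k, h1, h2, h3⟩ := (hasPairB_iff s).mp hp
      exact absurd ⟨j, k, h1, by omega, h2, h3⟩ hno
  | succ fuel ih =>
    intro i d hf hd1 hd2 hno
    by_cases hil : (i : Int) < (s.length : Int) - 1
    · have hlen : i + 2 ≤ s.length := by omega
      rw [PySem.List.pyRange_one_cons hil]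
      simp only [pvTwiceLoop]
      rw [show ((i : Int) + 2) = ((i : Int) + ((2 : Nat) : Int)) by norm_num,
        PySem.List.slice_natCast_add]
      have hcast : (i : Int) + 1 = ((i + 1 : Nat) : Int) := by push_cast; ring
      cases hg : PySem.Dict.get? d ((s.drop i).take 2) with
      | none =>
        simp only []
        rw [hcast]
        refine ih (i + 1) (d.insert ((s.drop i).take 2) (i : Int)) (by omega) ?_ ?_ ?_
        · intro p v hpv
          rw [PySem.Dict.get?_insert] at hpv
          split at hpv
          · rename_i hpk
            refine ⟨i, by simpa using hpv.symm, by omega, hlen, hpk.symm, ?_⟩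
            intro j' hj' hj'eq
            have hc := hd2 j' (by omega) (by omega)
            rw [hj'eq, hpk] at hc
            rw [PySem.Dict.get?_eq_none_iff_contains] at hg
            rw [hg] at hc
            exact Bool.false_ne_true hc
          · obtain ⟨j0, hv, hji, hjl, hjk, hfirst⟩ := hd1 p v hpv
            exact ⟨j0, hv, by omega, hjl, hjk, hfirst⟩
        · intro j hj hjlen
          rw [PySem.Dict.contains_insert]
          rcases Nat.lt_or_ge j i with hji | hji
          · rw [hd2 j hji hjlen]
            simp
          · have : j = i := by omega
            subst this
            simp
        · rintro ⟨j, k, h1, h2, h3, h4⟩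
          rcases Nat.lt_or_ge k i with hki | hki
          · exact hno ⟨j, k, h1, hki, h3, h4⟩
          · have hk : k = i := by omega
            subst hk
            have hc := hd2 j (by omega) (by omega)
            rw [h4] at hc
            rw [PySem.Dict.get?_eq_none_iff_contains] at hg
            rw [hg] at hc
            exact Bool.false_ne_true hc
      | some v =>
        simp only []
        obtain ⟨j0, hv, hji, hjl, hjk, hfirst⟩ := hd1 _ v hg
        subst hv
        by_cases hge : 2 ≤ (i : Int) - (j0 : Int)
        · rw [if_pos hge]
          exact ((hasPairB_iff s).mpr ⟨j0, i, by omega, hlen, by rw [hjk]⟩).symm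
        · rw [if_neg hge]
          have hj0 : j0 = i - 1 := by omega
          rw [hcast]
          refine ih (i + 1) d (by omega) ?_ ?_ ?_
          · intro p v hpv
            obtain ⟨j1, hv1, hj1, hl1, hk1, hf1⟩ := hd1 p v hpv
            exact ⟨j1, hv1, by omega, hl1, hk1, hf1⟩
          · intro j hj hjlen
            rcases Nat.lt_or_ge j i with hji2 | hji2
            · exact hd2 j hji2 hjlen
            · have : j = i := by omega
              subst this
              rw [PySem.Dict.contains_eq_isSome_get?, hg]
              rfl
          · rintro ⟨j, k, h1, h2, h3, h4⟩
            rcases Nat.lt_or_ge k i with hki | hki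
            · exact hno ⟨j, k, h1, hki, h3, h4⟩
            · have hk : k = i := by omega
              subst hk
              have hlt : j < j0 := by omega
              exact hfirst j hlt h4
    · have hbig : (s.length : Int) - 1 ≤ (i : Int) := by omega
      rw [PySem.List.pyRange_one_eq_nil hbig]
      simp only [pvTwiceLoop]
      cases hp : hasPairB s with
      | false => rfl
      | true =>
        obtain ⟨j, k, h1, h2, h3⟩ := (hasPairB_iff s).mp hp
        exact absurd ⟨j, k, h1, by omega, h2, h3⟩ hno

theorem twice_top (l : List Char) :
    pvTwiceLoop l (PySem.List.pyRange 0 (PySem.List.len l - 1) 1) PySem.Dict.empty =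
      hasPairB l := by
  have h := twice_inv l l.length 0 PySem.Dict.empty (by omega)
    (by intro p v hpv; rw [PySem.Dict.get?_empty] at hpv; exact absurd hpv (by simp))
    (by intro j hj _; exact absurd hj (Nat.not_lt_zero j))
    (by rintro ⟨j, k, _, h2, _, _⟩; exact absurd h2 (Nat.not_lt_zero k))
  simpa using h

theorem aNice_eq (s : String) :
    (pvAltLoop s.toList (PySem.List.enumerate (PySem.List.slice s.toList none (some (-2))) 0) &&
      pvPairLoop s.toList (PySem.List.enumerate s.toList 0) none) = pvANice s.toList := by
  have h1 := altLoop_drop s.toList 0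
  simp only [Nat.cast_zero, List.drop_zero] at h1
  rw [PySem.List.slice_to_neg_ofNat s.toList 2 (by norm_num), h1, pairLoop_top, pvANice]

theorem part2_foldl (data : List String) (n : Int) :
    List.foldl (fun nice s =>
        let l := s.toList
        let alternate := pvAltLoop l (PySem.List.enumerate (PySem.List.slice l none (some (-2))) 0)
        let pair := pvPairLoop l (PySem.List.enumerate l 0) none
        if alternate && pair then nice + 1 else nice) n data
      = n + ((data.countP fun s => pvANice s.toList : Nat) : Int) := by
  induction data generalizing n with
  | nil => simp
  | cons s t ih =>
    rw [List.foldl_cons, ih]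
    simp only [aNice_eq, List.countP_cons]
    cases pvANice s.toList
    · simp
    · simp; omega

theorem part2_eq_countP (data : List String) :
    part2 data = ((data.countP fun s => pvANice s.toList : Nat) : Int) := by
  unfold part2
  rw [part2_foldl, zero_add]

theorem part2_alt_foldl (data : List String) (n : Int) :
    List.foldl (fun nice s =>
        let l := s.toList
        let rep := pvRepeatZip l
        let twice := pvTwiceLoop l (PySem.List.pyRange 0 (PySem.List.len l - 1) 1) PySem.Dict.empty
        if rep && twice then nice + 1 else nice) n data
      = n + ((data.countP fun s => pvBNice s.toList : Nat) : Int) := by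
  induction data generalizing n with
  | nil => simp
  | cons s t ih =>
    rw [List.foldl_cons, ih]
    have hb : (pvRepeatZip s.toList &&
        pvTwiceLoop s.toList (PySem.List.pyRange 0 (PySem.List.len s.toList - 1) 1)
          PySem.Dict.empty) = pvBNice s.toList := by
      rw [repeatZip_eq, twice_top, pvBNice]
    simp only [hb, List.countP_cons]
    cases pvBNice s.toList
    · simp
    · simp; omega

theorem part2_alt_eq_countP (data : List String) :
    part2_alt data = ((data.countP fun s => pvBNice s.toList : Nat) : Int) := by
  unfold part2_alt
  rw [part2_alt_foldl, zero_add]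

theorem nice_cases (l : List Char) :
    (pvANice l = (pvBNice l || pvDFlag l)) ∧ ¬(pvBNice l = true ∧ pvDFlag l = true) := by
  unfold pvANice pvBNice pvDFlag
  cases hasRepeatB l <;> cases quirkB l <;> cases hasPairB l <;> simp

theorem countP_split (data : List String) :
    (data.countP fun s => pvANice s.toList) =
      (data.countP fun s => pvBNice s.toList) + (data.countP fun s => pvDFlag s.toList) := by
  induction data with
  | nil => rfl
  | cons s t ih =>
    simp only [List.countP_cons, ih]
    obtain ⟨h1, h2⟩ := nice_cases s.toList
    cases hb : pvBNice s.toList <;> cases hd : pvDFlag s.toList <;>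
      simp [hb, hd] at h1 h2 ⊢ <;> simp [h1] <;> omega

-- ===== VERDICT (by name: the statement is the Claim_ definition above) =====
theorem hasRepeatB_iff (l : List Char) :
    hasRepeatB l = true ↔ ∃ i < l.length - 2, l[i]! = l[i + 2]! := by
  induction l using hasRepeatB.induct with
  | case1 a b c t ih =>
    simp only [hasRepeatB, Bool.or_eq_true, beq_iff_eq, ih]
    constructor
    · rintro (rfl | ⟨i, hi, he⟩)
      · exact ⟨0, by simp, by simp⟩
      · exact ⟨i + 1, by simp at hi ⊢; omega, by simpa using he⟩
    · rintro ⟨i, hi, he⟩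
      cases i with
      | zero => left; simpa using he
      | succ i' => right; exact ⟨i', by simp at hi ⊢; omega, by simpa using he⟩
  | case2 l h =>
    have hlen : l.length ≤ 2 := by
      match l with
      | [] => simp
      | [_] => simp
      | [_, _] => simp
      | a :: b :: c :: t => exact absurd rfl (by intro hh; exact (h a b c t hh).elim)
    rw [hasRepeatB_short l hlen]
    constructor
    · intro hx; exact absurd hx (by simp)
    · rintro ⟨i, hi, _⟩; omega

theorem quirkB_iff (l : List Char) :
    quirkB l = true ↔ "None".toList ++ l.take 1 <:+: l.tail := by
  cases l with
  | nil =>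
    rw [show "None".toList ++ ([] : List Char).take 1 = ['N', 'o', 'n', 'e'] from rfl]
    simp [quirkB]
  | cons c t =>
    rw [show "None".toList ++ (c :: t).take 1 = 'N' :: 'o' :: 'n' :: 'e' :: [c] from rfl]
    simp [quirkB]

theorem hasPairB_iff' (l : List Char) :
    hasPairB l = true ↔ ∃ k < l.length - 1, (l.drop k).take 2 <:+: l.drop (k + 2) := by
  rw [hasPairB_iff]
  constructor
  · rintro ⟨j, k, h1, h2, h3⟩
    refine ⟨j, by omega, ?_⟩
    have hpre : (l.drop j).take 2 <+: l.drop k := by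
      rw [h3]
      exact List.take_prefix 2 _
    have hdr : l.drop k = (l.drop (j + 2)).drop (k - (j + 2)) := by
      rw [List.drop_drop]
      congr 1
      omega
    rw [hdr] at hpre
    exact hpre.isInfix.trans (List.drop_suffix _ _).isInfix
  · rintro ⟨k, hk, hinf⟩
    obtain ⟨t, hpre, hsuf⟩ := List.infix_iff_prefix_suffix.mp hinf
    obtain ⟨m, rfl⟩ : ∃ m, t = (l.drop (k + 2)).drop m :=
      ⟨(l.drop (k + 2)).length - t.length, by rw [← List.suffix_iff_eq_drop.mp hsuf]⟩
    rw [List.drop_drop] at hpre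
    have hlen2 : ((l.drop k).take 2).length = 2 := by
      simp
      omega
    have hlenle := hpre.length_le
    have heq : (l.drop k).take 2 = (l.drop (k + 2 + m)).take 2 := by
      have := List.prefix_iff_eq_take.mp hpre
      rwa [hlen2] at this
    refine ⟨k, k + 2 + m, by omega, ?_, heq⟩
    rw [hlen2, List.length_drop] at hlenle
    omega

theorem dflag_iff (s : String) :
    ((∃ i < s.toList.length - 2, s.toList[i]! = s.toList[i + 2]!) ∧
      "None".toList ++ s.toList.take 1 <:+: s.toList.tail ∧
      ∀ k < s.toList.length - 1, ¬ (s.toList.drop k).take 2 <:+: s.toList.drop (k + 2))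
    ↔ pvDFlag s.toList = true := by
  unfold pvDFlag
  simp only [Bool.and_eq_true, Bool.not_eq_true']
  rw [← hasRepeatB_iff, ← quirkB_iff,
    show (hasPairB s.toList = false) ↔ ¬(hasPairB s.toList = true) from by simp,
    hasPairB_iff']
  push Not
  tauto

theorem D_iff (data : List String) :
    D_part2 data ↔ (data.any fun s => pvDFlag s.toList) = true := by
  unfold D_part2
  rw [List.any_eq_true]
  exact exists_congr fun s => and_congr_right fun _ => dflag_iff s

theorem part2_spec : Claim_unchanged_part2 := by
  intro data _ hnD
  rw [part2_eq_countP, part2_alt_eq_countP, countP_split]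
  have h0 : (data.countP fun s => pvDFlag s.toList) = 0 := by
    rw [List.countP_eq_zero]
    intro s hs hflag
    exact hnD ((D_iff data).mpr (List.any_eq_true.mpr ⟨s, hs, hflag⟩))
  rw [h0]; norm_num

theorem part2_changed : Claim_changed_part2 := by unfold Claim_changed_part2; decide

theorem part2_tight : Claim_exact_part2 := by
  intro data _ hD
  rw [part2_eq_countP, part2_alt_eq_countP, countP_split]
  have hpos : 0 < (data.countP fun s => pvDFlag s.toList) := by
    obtain ⟨s, hs, hflag⟩ := List.any_eq_true.mp ((D_iff data).mp hD)
    exact List.countP_pos_iff.mpr ⟨s, hs, hflag⟩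
  intro h
  omega
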